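-- pv_equiv track=rewrite | github.com/maximo770/pymatria | module.py | reduce_number_to_hebrew_word
-- ===== SOURCE A (Python) =====
-- GEMATRIA_CHART = {
--     "א": 1,
--     "ב": 2,
--     "ג": 3,
--     "ד": 4,
--     "ה": 5,
--     "ו": 6,
--     "ז": 7,
--     "ח": 8,
--     "ט": 9,
--     "י": 10,
--     "כ": 20,
--     "ל": 30,
--     "מ": 40,
--     "נ": 50,
--     "ס": 60,
--     "ע": 70,
--     "פ": 80,
--     "צ": 90,
--     "ק": 100,
--     "ר": 200,
--     "ש": 300,
--     "ת": 400,
--     "ך": 500,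
--     "ם": 600,
--     "ן": 700,
--     "ף": 800,
--     "ץ": 900,
-- }
--
-- def reduce_number_to_hebrew_word(numbers):
--     """Converts a given number to its corresponding Hebrew word using gematria."""
--     # Initialize an empty string to store the Hebrew word
--     hebrew_words = ""
--
--     # Check if the input number is valid
--     if numbers < 1 or numbers > 7000:
--         raise ValueError("The input number must be between 1 and 7000.")
--
--     # Iterate while the number is greater than zero
--     while numbers > 0:
--         # Find the largest gematria value that is less than or equal to the remaining number
--         largest_gematria_value = 0
--         for values in GEMATRIA_CHART.values():
--             if numbers >= values > largest_gematria_value: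
--                 largest_gematria_value = values
--
--         # Find the corresponding Hebrew letter for the largest gematria value
--         hebrew_letter = ""
--         for letter, values in GEMATRIA_CHART.items():
--             if values == largest_gematria_value:
--                 hebrew_letter = letter
--                 break
--
--         # Append the Hebrew letter to the word
--         hebrew_words += hebrew_letter
--
--         # Subtract the largest gematria value from the remaining number
--         numbers -= largest_gematria_value
--
--     # Return the Hebrew word
--     return hebrew_words
-- ===== SOURCE B (Python) =====
-- GEMATRIA_CHART = {
--     "א": 1, "ב": 2, "ג": 3, "ד": 4, "ה": 5, "ו": 6, "ז": 7, "ח": 8, "ט": 9,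
--     "י": 10, "כ": 20, "ל": 30, "מ": 40, "נ": 50, "ס": 60, "ע": 70, "פ": 80,
--     "צ": 90, "ק": 100, "ר": 200, "ש": 300, "ת": 400, "ך": 500, "ם": 600,
--     "ן": 700, "ף": 800, "ץ": 900,
-- }
--
-- _DENOMS = sorted(GEMATRIA_CHART.items(), key=lambda kv: kv[1], reverse=True)
--
-- def reduce_number_to_hebrew_word(numbers):
--     """Converts a given number to its corresponding Hebrew word using gematria."""
--     if numbers < 1 or numbers > 7000:
--         raise ValueError("The input number must be between 1 and 7000.")
--     parts = []
--     for letter, value in _DENOMS: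
--         count, numbers = divmod(numbers, value)
--         parts.append(letter * count)
--     return "".join(parts)
-- ===== Notes on version B (the rewrite author's own statement) =====
-- stated objective: simpler
-- what changed: Replaces A's outer while loop with its two full chart rescans per emitted letter (find largest value, then find its letter) by a single divmod pass over the chart pre-sorted by value descending, appending letter*count per denomination.
import Mathlib
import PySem

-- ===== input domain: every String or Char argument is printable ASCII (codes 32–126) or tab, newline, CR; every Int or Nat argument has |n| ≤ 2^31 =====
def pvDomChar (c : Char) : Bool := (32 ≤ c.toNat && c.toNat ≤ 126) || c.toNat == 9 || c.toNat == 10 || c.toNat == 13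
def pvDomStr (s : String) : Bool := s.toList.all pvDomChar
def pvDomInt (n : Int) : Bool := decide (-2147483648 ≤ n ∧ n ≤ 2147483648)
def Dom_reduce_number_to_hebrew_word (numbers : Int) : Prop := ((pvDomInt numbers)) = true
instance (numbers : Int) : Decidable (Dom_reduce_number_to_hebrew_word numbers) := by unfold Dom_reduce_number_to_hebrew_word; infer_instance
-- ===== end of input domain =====

-- B replaces A's outer while loop with its two chart rescans per emitted letter by a
-- single divmod pass over the chart sorted by value descending (objective: simpler).

-- GEMATRIA_CHART, in insertion order (letter, value)
def pvChart : List (Char × Int) :=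
  [('א',1),('ב',2),('ג',3),('ד',4),('ה',5),('ו',6),('ז',7),('ח',8),('ט',9),
   ('י',10),('כ',20),('ל',30),('מ',40),('נ',50),('ס',60),('ע',70),('פ',80),
   ('צ',90),('ק',100),('ר',200),('ש',300),('ת',400),('ך',500),('ם',600),
   ('ן',700),('ף',800),('ץ',900)]

-- ===== PORT A =====
-- inner loop 1: largest gematria value ≤ n
def pvLargest (n : Int) : Int :=
  pvChart.foldl (fun acc p => if n ≥ p.2 ∧ p.2 > acc then p.2 else acc) 0

-- inner loop 2 with break: first letter whose value equals g ("" if none)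
def pvLetter (g : Int) : List Char :=
  match pvChart.find? (fun p => p.2 == g) with
  | some p => [p.1]
  | none => []

-- the while loop; fuel = numbers.toNat bounds the iteration count (each step subtracts ≥ 1)
def pvLoopA : Nat → Int → List Char → List Char
  | 0, _, acc => acc
  | f+1, n, acc =>
      if n > 0 then pvLoopA f (n - pvLargest n) (acc ++ pvLetter (pvLargest n)) else acc

def reduce_number_to_hebrew_word (numbers : Int) : String :=
  if numbers < 1 ∨ numbers > 7000 then ""  -- Python raises ValueError here; excluded by Pre_
  else String.ofList (pvLoopA numbers.toNat numbers [])

-- ===== PORT B =====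
-- _DENOMS = sorted(GEMATRIA_CHART.items(), key=lambda kv: kv[1], reverse=True)
def pvDenoms : List (Char × Int) := PySem.List.sorted pvChart (fun p => p.2) true

-- loop body: count, numbers = divmod(numbers, value); parts.append(letter * count)
def pvStepB (st : Int × List (List Char)) (p : Char × Int) : Int × List (List Char) :=
  (PySem.Int.mod st.1 p.2,
   st.2 ++ [PySem.List.pyRepeat [p.1] (PySem.Int.floordiv st.1 p.2)])

def reduce_number_to_hebrew_word_alt (numbers : Int) : String :=
  if numbers < 1 ∨ numbers > 7000 then ""  -- Python raises ValueError here; excluded by Pre_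
  else String.ofList (PySem.Chars.join [] (pvDenoms.foldl pvStepB (numbers, [])).2)

-- ===== PRECONDITION & SPEC =====
-- exactly where Python's A returns (outside 1..7000 it raises ValueError)
def Pre_reduce_number_to_hebrew_word (numbers : Int) : Prop := 1 ≤ numbers ∧ numbers ≤ 7000
instance (numbers : Int) : Decidable (Pre_reduce_number_to_hebrew_word numbers) := by
  unfold Pre_reduce_number_to_hebrew_word; infer_instance
def pvWitness_reduce_number_to_hebrew_word : Int := 1234

def Spec_reduce_number_to_hebrew_word (numbers : Int) (out : String) : Prop := out = reduce_number_to_hebrew_word_alt numbers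
instance (numbers : Int) (out : String) : Decidable (Spec_reduce_number_to_hebrew_word numbers out) := by unfold Spec_reduce_number_to_hebrew_word; infer_instance

-- ===== CLAIM (what is proved, stated in full; the proofs are below) =====
def Claim_equal_reduce_number_to_hebrew_word : Prop := ∀ (numbers : Int), Dom_reduce_number_to_hebrew_word numbers → Pre_reduce_number_to_hebrew_word numbers → Spec_reduce_number_to_hebrew_word numbers (reduce_number_to_hebrew_word numbers)

-- ===== LEMMAS AND PROOFS =====

-- pvDenoms, evaluated once (27-element insertion sort)
theorem pvDenoms_lit : pvDenoms =
  [('ץ',900),('ף',800),('ן',700),('ם',600),('ך',500),('ת',400),('ש',300),('ר',200),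
   ('ק',100),('צ',90),('פ',80),('ע',70),('ס',60),('נ',50),('מ',40),('ל',30),('כ',20),
   ('י',10),('ט',9),('ח',8),('ז',7),('ו',6),('ה',5),('ד',4),('ג',3),('ב',2),('א',1)] := by
  decide

-- "".join with empty separator is flatten
theorem pvJoin_nil (l : List (List Char)) : PySem.Chars.join [] l = l.flatten := by
  show (List.intersperse ([]:List Char) l).flatten = l.flatten
  induction l with
  | nil => simp
  | cons x t ih => cases t <;> simp_all [List.intersperse]

-- the parts list B builds, and its flattening
def pvParts (n : Int) (l : List (Char × Int)) : List (List Char) :=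
  (l.foldl pvStepB (n, [])).2
def pvF (n : Int) (l : List (Char × Int)) : List Char := (pvParts n l).flatten

theorem pvStepB_acc (l : List (Char × Int)) (n : Int) (acc : List (List Char)) :
    (l.foldl pvStepB (n, acc)).2 = acc ++ pvParts n l := by
  induction l generalizing n acc with
  | nil => simp [pvParts]
  | cons p t ih =>
      simp only [pvParts, List.foldl_cons, pvStepB, List.nil_append]
      rw [ih, ih (PySem.Int.mod n p.2) [PySem.List.pyRepeat [p.1] (PySem.Int.floordiv n p.2)]]
      simp [pvParts]

theorem pvF_cons (p : Char × Int) (t : List (Char × Int)) (n : Int) :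
    pvF n (p :: t) =
      PySem.List.pyRepeat [p.1] (PySem.Int.floordiv n p.2) ++ pvF (PySem.Int.mod n p.2) t := by
  simp only [pvF, pvParts, List.foldl_cons, pvStepB]
  rw [pvStepB_acc]
  simp [pvParts]

theorem pvF_zero (l : List (Char × Int)) (hpos : ∀ p ∈ l, 0 < p.2) : pvF 0 l = [] := by
  induction l with
  | nil => simp [pvF, pvParts]
  | cons p t ih =>
      have hp : 0 < p.2 := hpos p (by simp)
      rw [pvF_cons]
      rw [PySem.Int.floordiv_eq_ediv_of_pos hp, PySem.Int.mod_eq_emod_of_pos hp]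
      simp [PySem.List.pyRepeat_singleton, ih (fun q hq => hpos q (by simp [hq]))]

-- spec of A's running-max loop over the chart
theorem pvMax_spec (l : List (Char × Int)) (n : Int) : ∀ (a : Int),
    a ≤ l.foldl (fun acc p => if n ≥ p.2 ∧ p.2 > acc then p.2 else acc) a ∧
    (l.foldl (fun acc p => if n ≥ p.2 ∧ p.2 > acc then p.2 else acc) a = a ∨
      ∃ c, (c, l.foldl (fun acc p => if n ≥ p.2 ∧ p.2 > acc then p.2 else acc) a) ∈ l ∧
        l.foldl (fun acc p => if n ≥ p.2 ∧ p.2 > acc then p.2 else acc) a ≤ n) ∧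
    (∀ p ∈ l, p.2 ≤ n → p.2 ≤ l.foldl (fun acc p => if n ≥ p.2 ∧ p.2 > acc then p.2 else acc) a) := by
  induction l with
  | nil => intro a; simp
  | cons q t ih =>
      intro a
      simp only [List.foldl_cons]
      by_cases h : n ≥ q.2 ∧ q.2 > a
      · rw [if_pos h]
        obtain ⟨h1, h2, h3⟩ := ih q.2
        refine ⟨by omega, ?_, ?_⟩
        · rcases h2 with h2 | ⟨c, hc, hle⟩
          · exact Or.inr ⟨q.1, by rw [h2]; simp, by omega⟩
          · exact Or.inr ⟨c, by simp [hc], hle⟩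
        · intro p hp hpn
          rcases List.mem_cons.mp hp with rfl | hp
          · omega
          · exact h3 p hp hpn
      · rw [if_neg h]
        obtain ⟨h1, h2, h3⟩ := ih a
        refine ⟨h1, ?_, ?_⟩
        · rcases h2 with h2 | ⟨c, hc, hle⟩
          · exact Or.inl h2
          · exact Or.inr ⟨c, by simp [hc], hle⟩
        · intro p hp hpn
          rcases List.mem_cons.mp hp with rfl | hp
          · omega
          · exact h3 p hp hpn

-- on a strictly descending list, find? (value ≤ n) hits the maximal eligible pair
theorem pvFind_of_max (l : List (Char × Int)) (n : Int) (c : Char) (v : Int)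
    (hdesc : l.Pairwise (fun a b => b.2 < a.2)) (hmem : (c, v) ∈ l) (hvn : v ≤ n)
    (hmax : ∀ p ∈ l, p.2 ≤ n → p.2 ≤ v) :
    l.find? (fun p => decide (p.2 ≤ n)) = some (c, v) := by
  induction l with
  | nil => simp at hmem
  | cons q t ih =>
      rw [List.pairwise_cons] at hdesc
      by_cases h : q.2 ≤ n
      · have hqv : q.2 ≤ v := hmax q (by simp) h
        have : (c, v) = q := by
          rcases List.mem_cons.mp hmem with h' | h'
          · exact h'.symm ▸ rfl
          · have := hdesc.1 _ h'
            omega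
        rw [← this]
        simp [List.find?_cons_of_pos, hvn]
      · have hne : (c, v) ≠ q := by
          intro he; rw [← he] at h; exact h hvn
        rw [List.find?_cons_of_neg (by simpa using h)]
        exact ih hdesc.2 (by rcases List.mem_cons.mp hmem with h' | h' <;> [exact absurd h' hne; exact h']) (fun p hp => hmax p (by simp [hp]))

-- on a list with pairwise-distinct values, find? (value == v) returns v's own pair
theorem pvFindVal (l : List (Char × Int)) (c : Char) (v : Int)
    (hdist : l.Pairwise (fun a b => a.2 ≠ b.2)) (hmem : (c, v) ∈ l) :
    l.find? (fun p => p.2 == v) = some (c, v) := by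
  induction l with
  | nil => simp at hmem
  | cons q t ih =>
      rw [List.pairwise_cons] at hdist
      rcases List.mem_cons.mp hmem with h' | h'
      · rw [← h']
        simp
      · have hne : q.2 ≠ v := by
          have := hdist.1 _ h'
          simpa using this
        rw [List.find?_cons_of_neg (by simpa using hne)]
        exact ih hdist.2 h'

-- the chart has pairwise-distinct values, so the letter scan returns v's own letter
theorem pvLetter_of_mem (c : Char) (v : Int) (hmem : (c, v) ∈ pvChart) :
    pvLetter v = [c] := by
  have hdist : pvChart.Pairwise (fun a b => a.2 ≠ b.2) := by decide
  unfold pvLetter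
  rw [pvFindVal pvChart c v hdist hmem]

-- bridge: for 0 < n, A's largest value is found (with its letter) by find? on pvDenoms
theorem pvBridge (n : Int) (hn : 0 < n) :
    ∃ c, pvDenoms.find? (fun p => decide (p.2 ≤ n)) = some (c, pvLargest n) ∧
      pvLetter (pvLargest n) = [c] := by
  obtain ⟨_, h2, h3⟩ := pvMax_spec pvChart n 0
  have h1 : 1 ≤ pvLargest n := by
    have := h3 ('א', 1) (by decide) hn
    simpa [pvLargest] using this
  have hmem : ∃ c, (c, pvLargest n) ∈ pvChart ∧ pvLargest n ≤ n := by
    rcases h2 with h2 | h2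
    · exfalso; unfold pvLargest at h1; omega
    · exact h2
  obtain ⟨c, hc, hcn⟩ := hmem
  refine ⟨c, ?_, pvLetter_of_mem c _ hc⟩
  have hdesc : pvDenoms.Pairwise (fun a b => b.2 < a.2) := by rw [pvDenoms_lit]; decide
  have hmemD : (c, pvLargest n) ∈ pvDenoms := (PySem.List.mem_sorted _ _ _ _).mpr hc
  exact pvFind_of_max pvDenoms n c (pvLargest n) hdesc hmemD hcn
    (fun p hp hpn => h3 p ((PySem.List.mem_sorted _ _ _ _).mp hp) hpn)

-- peel: one greedy step of B's divmod pass
theorem pvPeel (l : List (Char × Int)) (n : Int) (c : Char) (v : Int) (hn : 0 ≤ n)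
    (hdesc : l.Pairwise (fun a b => b.2 < a.2)) (hpos : ∀ p ∈ l, 0 < p.2)
    (hfind : l.find? (fun p => decide (p.2 ≤ n)) = some (c, v)) :
    pvF n l = c :: pvF (n - v) l := by
  induction l with
  | nil => simp at hfind
  | cons q t ih =>
      rw [List.pairwise_cons] at hdesc
      have hqpos : 0 < q.2 := hpos q (by simp)
      by_cases h : q.2 ≤ n
      · rw [List.find?_cons_of_pos (by simpa using h)] at hfind
        have hq : q = (c, v) := by simpa using hfind
        subst hq
        rw [pvF_cons, pvF_cons]
        dsimp only at *
        have hv : 0 < v := hqpos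
        rw [PySem.Int.floordiv_eq_ediv_of_pos hv, PySem.Int.floordiv_eq_ediv_of_pos hv,
            PySem.Int.mod_eq_emod_of_pos hv, PySem.Int.mod_eq_emod_of_pos hv]
        rw [← Int.sub_emod_right n v]
        have hdiv : n / v = (n - v) / v + 1 := by
          have h2 : n - v + 1 * v = n := by ring
          have := Int.add_mul_ediv_right (n - v) 1 (by omega : v ≠ 0)
          rw [h2] at this
          omega
        have hge : 0 ≤ (n - v) / v := Int.ediv_nonneg (by omega) (le_of_lt hv)
        rw [hdiv, PySem.List.pyRepeat_singleton, PySem.List.pyRepeat_singleton]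
        have ht : ((n - v) / v + 1).toNat = ((n - v) / v).toNat + 1 := by omega
        rw [ht, List.replicate_succ]
        simp
      · rw [List.find?_cons_of_neg (by simpa using h)] at hfind
        have hvle : v ≤ n := by
          have := List.find?_some hfind
          simpa using this
        rw [pvF_cons, pvF_cons]
        have hvpos : 0 < v := hpos (c, v) (List.mem_cons_of_mem q (List.mem_of_find?_eq_some hfind))
        have hnq : n < q.2 := by omega
        have hd0 : PySem.Int.floordiv n q.2 = 0 := by
          rw [PySem.Int.floordiv_eq_ediv_of_pos hqpos]
          exact Int.ediv_eq_zero_of_lt hn hnq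
        have hm0 : PySem.Int.mod n q.2 = n := by
          rw [PySem.Int.mod_eq_emod_of_pos hqpos]
          exact Int.emod_eq_of_lt hn hnq
        have hd0' : PySem.Int.floordiv (n - v) q.2 = 0 := by
          rw [PySem.Int.floordiv_eq_ediv_of_pos hqpos]
          exact Int.ediv_eq_zero_of_lt (by omega) (by omega)
        have hm0' : PySem.Int.mod (n - v) q.2 = n - v := by
          rw [PySem.Int.mod_eq_emod_of_pos hqpos]
          exact Int.emod_eq_of_lt (by omega) (by omega)
        rw [hd0, hm0, hd0', hm0']
        simp only [PySem.List.pyRepeat_singleton, Int.toNat_zero, List.replicate_zero,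
          List.nil_append]
        exact ih hdesc.2 (fun p hp => hpos p (by simp [hp])) hfind

-- main loop invariant
theorem pvLoopA_eq (k : Nat) : ∀ (n : Int) (acc : List Char), n.toNat ≤ k → 0 ≤ n →
    pvLoopA k n acc = acc ++ pvF n pvDenoms := by
  induction k with
  | zero =>
      intro n acc hk hn
      have : n = 0 := by omega
      subst this
      rw [pvF_zero pvDenoms (by rw [pvDenoms_lit]; decide)]
      simp [pvLoopA]
  | succ k ih =>
      intro n acc hk hn
      by_cases hpos : 0 < n
      · obtain ⟨c, hfind, hletter⟩ := pvBridge n hpos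
        have hvle : pvLargest n ≤ n := by
          have := List.find?_some hfind
          simpa using this
        have hv1 : 1 ≤ pvLargest n := by
          obtain ⟨_, _, h3⟩ := pvMax_spec pvChart n 0
          have := h3 ('א', 1) (by decide) hpos
          simpa [pvLargest] using this
        have hdesc : pvDenoms.Pairwise (fun a b => b.2 < a.2) := by rw [pvDenoms_lit]; decide
        rw [pvPeel pvDenoms n c (pvLargest n) hn hdesc (by rw [pvDenoms_lit]; decide) hfind]
        show pvLoopA (k+1) n acc = acc ++ (c :: pvF (n - pvLargest n) pvDenoms)
        rw [pvLoopA, if_pos hpos, hletter]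
        rw [ih (n - pvLargest n) (acc ++ [c]) (by omega) (by omega)]
        simp
      · have : n = 0 := by omega
        subst this
        rw [pvF_zero pvDenoms (by rw [pvDenoms_lit]; decide)]
        simp [pvLoopA]

-- ===== VERDICT (by name: the statement is the Claim_ definition above) =====
theorem reduce_number_to_hebrew_word_spec : Claim_equal_reduce_number_to_hebrew_word := by
  intro n _ hpre
  unfold Pre_reduce_number_to_hebrew_word at hpre
  unfold Spec_reduce_number_to_hebrew_word
  unfold reduce_number_to_hebrew_word reduce_number_to_hebrew_word_alt
  rw [if_neg (by omega), if_neg (by omega)]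
  rw [pvLoopA_eq n.toNat n [] le_rfl (by omega), pvJoin_nil]
  simp only [pvF, pvParts, List.nil_append]
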